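-- pv_equiv track=rewrite | github.com/CodingManiac11/PhishGuard | backend/feature_extractor.py | _detect_suspicious_file_extension
-- ===== SOURCE A (Python) =====
-- def _detect_suspicious_file_extension(path: str) -> bool:
--     """Detect suspicious/executable file extensions commonly used in malware"""
--     suspicious_extensions = [
--         # Executables
--         '.exe', '.msi', '.bat', '.cmd', '.com', '.scr', '.pif',
--         # Scripts
--         '.vbs', '.vbe', '.js', '.jse', '.ws', '.wsf', '.wsc', '.wsh',
--         '.ps1', '.psm1', '.psd1',
--         # Documents with macros
--         '.docm', '.xlsm', '.pptm', '.dotm',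
--         # Archives (often used to hide malware)
--         '.zip', '.rar', '.7z', '.tar', '.gz',
--         # Other suspicious
--         '.dll', '.sys', '.drv', '.ocx',
--         '.lim', '.bin', '.dat', '.tmp',  # Uncommon extensions like in the malware URL
--         '.apk', '.ipa',  # Mobile apps
--     ]
--
--     path_lower = path.lower()
--     for ext in suspicious_extensions:
--         if path_lower.endswith(ext):
--             return True
--     return False
-- ===== SOURCE B (Python) =====
-- SUFFIXES = frozenset(
--     'exe msi bat cmd com scr pif '
--     'vbs vbe js jse ws wsf wsc wsh ps1 psm1 psd1 '
--     'docm xlsm pptm dotm '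
--     'zip rar 7z tar gz '
--     'dll sys drv ocx '
--     'lim bin dat tmp '
--     'apk ipa'.split())
--
-- def _detect_suspicious_file_extension(path: str) -> bool:
--     _stem, sep, ext = path.lower().rpartition('.')
--     return bool(sep) and ext in SUFFIXES
-- ===== Notes on version B (the rewrite author's own statement) =====
-- stated objective: idiomatic
-- what changed: Replaced A's loop of 37 endswith tests over dotted candidates by one rpartition at the last dot followed by a single frozenset membership test on the bare extension word.
import Mathlib
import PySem

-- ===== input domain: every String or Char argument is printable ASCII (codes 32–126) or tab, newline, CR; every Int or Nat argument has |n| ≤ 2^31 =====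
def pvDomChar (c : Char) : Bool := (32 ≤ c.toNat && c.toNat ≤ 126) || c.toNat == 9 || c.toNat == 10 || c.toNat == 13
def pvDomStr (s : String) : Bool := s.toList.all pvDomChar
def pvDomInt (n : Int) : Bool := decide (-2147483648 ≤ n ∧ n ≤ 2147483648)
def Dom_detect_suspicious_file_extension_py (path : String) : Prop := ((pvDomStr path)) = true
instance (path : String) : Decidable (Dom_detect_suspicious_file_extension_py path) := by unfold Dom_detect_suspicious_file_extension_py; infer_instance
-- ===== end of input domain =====

-- B replaces A's loop of 37 endswith tests on dotted candidates by one rpartition at the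
-- last dot followed by a single set-membership test on the bare extension word (idiomatic).

-- ===== PORT A =====
-- A's in-function list of suspicious extensions, in A's order.
def pvSuspiciousExtensions : List (List Char) :=
  [".exe".toList, ".msi".toList, ".bat".toList, ".cmd".toList, ".com".toList, ".scr".toList, ".pif".toList,
   ".vbs".toList, ".vbe".toList, ".js".toList, ".jse".toList, ".ws".toList, ".wsf".toList, ".wsc".toList, ".wsh".toList,
   ".ps1".toList, ".psm1".toList, ".psd1".toList,
   ".docm".toList, ".xlsm".toList, ".pptm".toList, ".dotm".toList,
   ".zip".toList, ".rar".toList, ".7z".toList, ".tar".toList, ".gz".toList,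
   ".dll".toList, ".sys".toList, ".drv".toList, ".ocx".toList,
   ".lim".toList, ".bin".toList, ".dat".toList, ".tmp".toList,
   ".apk".toList, ".ipa".toList]

-- 'for ext in …: if path_lower.endswith(ext): return True / return False' is any over the list.
def detect_suspicious_file_extension_py (path : String) : Bool :=
  let path_lower := PySem.Chars.lower path.toList
  pvSuspiciousExtensions.any (fun ext => PySem.Chars.endswith path_lower ext)

-- ===== PORT B =====
-- B's frozenset built by splitting one space-separated word string (Source B's SUFFIXES).
def pvSuffixes : PySem.Set (List Char) :=
  PySem.Set.ofList (PySem.Chars.split₀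
    ("exe msi bat cmd com scr pif vbs vbe js jse ws wsf wsc wsh ps1 psm1 psd1 docm xlsm pptm dotm zip rar 7z tar gz dll sys drv ocx lim bin dat tmp apk ipa".toList))

-- Hand port (exact) of s.rpartition('.'): (head before last dot, separator, tail after it);
-- Python returns ('', '', s) when s has no dot.
def rpartitionDot : List Char → List Char × List Char × List Char
  | [] => ([], [], [])
  | c :: rest =>
    match rpartitionDot rest with
    | (h, [], _) =>
      if c = '.' then ([], ['.'], rest) else (h, [], c :: rest)
    | (h, s, t) => (c :: h, s, t)

-- 'bool(sep) and ext in SUFFIXES'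
def detect_suspicious_file_extension_py_alt (path : String) : Bool :=
  let r := rpartitionDot (PySem.Chars.lower path.toList)
  !r.2.1.isEmpty && PySem.Set.contains pvSuffixes r.2.2

-- ===== PRECONDITION & SPEC =====
def Spec_detect_suspicious_file_extension_py (path : String) (out : Bool) : Prop := out = detect_suspicious_file_extension_py_alt path
instance (path : String) (out : Bool) : Decidable (Spec_detect_suspicious_file_extension_py path out) := by unfold Spec_detect_suspicious_file_extension_py; infer_instance

-- ===== CLAIM (what is proved, stated in full; the proofs are below) =====
def Claim_equal_detect_suspicious_file_extension_py : Prop := ∀ (path : String), Dom_detect_suspicious_file_extension_py path → Spec_detect_suspicious_file_extension_py path (detect_suspicious_file_extension_py path)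

-- ===== LEMMAS AND PROOFS =====

-- Proof-side helper: the piece after the LAST dot, or none when there is no dot.
def afterLastDot : List Char → Option (List Char)
  | [] => none
  | c :: rest =>
    match afterLastDot rest with
    | some t => some t
    | none => if c = '.' then some rest else none

-- The word list B's set is built from, fully evaluated.
def pvSuffixWords : List (List Char) :=
  PySem.Chars.split₀
    ("exe msi bat cmd com scr pif vbs vbe js jse ws wsf wsc wsh ps1 psm1 psd1 docm xlsm pptm dotm zip rar 7z tar gz dll sys drv ocx lim bin dat tmp apk ipa".toList)

-- A's list is exactly B's word list with a '.' prepended to each word.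
set_option maxRecDepth 8192 in
theorem pvExts_eq : pvSuspiciousExtensions = pvSuffixWords.map (fun w => '.' :: w) := by decide

-- B's word list holds distinct words, so Set.ofList leaves it unchanged.
set_option maxRecDepth 8192 in
theorem pvSuffixes_eq : pvSuffixes = pvSuffixWords :=
  PySem.Set.ofList_eq_self_of_nodup _ (by decide)

-- No word of B's list contains a dot.
set_option maxRecDepth 8192 in
theorem pvSuffixWords_nodot : ∀ w ∈ pvSuffixWords, '.' ∉ w := by decide

-- afterLastDot finds nothing iff the list contains no dot.
theorem afterLastDot_eq_none_iff (cs : List Char) : afterLastDot cs = none ↔ '.' ∉ cs := by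
  induction cs with
  | nil => simp [afterLastDot]
  | cons c rest ih =>
    cases h : afterLastDot rest with
    | some t =>
      have hm : '.' ∈ rest := by
        by_contra hx
        exact absurd (ih.mpr hx) (by simp [h])
      simp [afterLastDot, h, hm]
    | none =>
      have hr : '.' ∉ rest := ih.mp h
      by_cases hc : c = '.'
      · simp [afterLastDot, h, hc]
      · have hc' : ¬ '.' = c := fun e => hc e.symm
        simp [afterLastDot, h, hc, hc', hr]

-- B's rpartition has empty separator exactly when there is no dot, and its tail is the
-- piece after the last dot otherwise.
theorem rpartitionDot_spec (cs : List Char) :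
    (afterLastDot cs = none → (rpartitionDot cs).2.1 = []) ∧
    (∀ t, afterLastDot cs = some t → (rpartitionDot cs).2 = (['.'], t)) := by
  induction cs with
  | nil => exact ⟨fun _ => rfl, fun t h => by cases h⟩
  | cons c rest ih =>
    obtain ⟨ihn, ihs⟩ := ih
    cases h : afterLastDot rest with
    | some t =>
      have hr := ihs t h
      constructor
      · intro hn
        exfalso
        simp [afterLastDot, h] at hn
      · intro u hu
        have hu' : t = u := by simpa [afterLastDot, h] using hu
        subst hu'
        unfold rpartitionDot
        rcases hR : rpartitionDot rest with ⟨hh, ss, tt⟩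
        rw [hR] at hr
        simp only [Prod.mk.injEq] at hr
        obtain ⟨hs1, hs2⟩ := hr
        subst hs1; subst hs2
        rfl
    | none =>
      have hr := ihn h
      rcases hR : rpartitionDot rest with ⟨hh, ss, tt⟩
      rw [hR] at hr; simp only at hr; subst hr
      by_cases hc : c = '.'
      · constructor
        · intro hn
          exfalso
          simp [afterLastDot, h, hc] at hn
        · intro u hu
          have hu' : rest = u := by simpa [afterLastDot, h, hc] using hu
          subst hu'
          unfold rpartitionDot
          rw [hR]
          simp [hc]
      · constructor
        · intro _
          unfold rpartitionDot
          rw [hR]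
          simp [hc]
        · intro u hu
          exfalso
          simp [afterLastDot, h, hc] at hu

-- Key characterisation: ending with '.'++ext (ext dot-free) is exactly 'the part after the LAST dot is ext'.
theorem afterLastDot_char (cs ext : List Char) (hext : '.' ∉ ext) :
    ('.' :: ext) <:+ cs ↔ afterLastDot cs = some ext := by
  induction cs with
  | nil => simp [afterLastDot]
  | cons c rest ih =>
    rw [List.suffix_cons_iff]
    cases h : afterLastDot rest with
    | some t =>
      simp only [afterLastDot, h]
      constructor
      · rintro (heq | hsuf)
        · obtain ⟨h1, h2⟩ := List.cons.inj heq
          subst h2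
          rw [(afterLastDot_eq_none_iff ext).mpr hext] at h
          cases h
        · have h' := ih.mp hsuf
          rw [h] at h'
          exact h'
      · intro ht
        exact Or.inr (ih.mpr (by rw [h, ht]))
    | none =>
      simp only [afterLastDot, h]
      have hnr : ¬ ('.' :: ext) <:+ rest := fun hs => by
        have h' := ih.mp hs
        rw [h] at h'
        cases h'
      by_cases hc : c = '.'
      · subst hc
        constructor
        · rintro (heq | hsuf)
          · simp [(List.cons.inj heq).2]
          · exact absurd hsuf hnr
        · intro ht
          exact Or.inl (by simp [Option.some.inj ht])
      · simp only [if_neg hc]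
        constructor
        · rintro (heq | hsuf)
          · exact absurd (List.cons.inj heq).1.symm hc
          · exact absurd hsuf hnr
        · intro ht
          cases ht

-- Bool form used on A's endswith tests when the path has a dot (t = the part after the last dot).
theorem endswith_eq_beq (cs t w : List Char) (hl : afterLastDot cs = some t) (hw : '.' ∉ w) :
    PySem.Chars.endswith cs ('.' :: w) = (t == w) := by
  by_cases hx : t = w
  · subst hx
    have hs : ('.' :: t) <:+ cs := (afterLastDot_char cs t hw).mpr hl
    rw [(PySem.Chars.endswith_iff cs ('.' :: t)).mpr hs]
    simp
  · have hs : ¬ ('.' :: w) <:+ cs := fun hsuf => by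
      rw [(afterLastDot_char cs w hw).mp hsuf] at hl
      exact hx (Option.some.inj hl).symm
    have h1 : PySem.Chars.endswith cs ('.' :: w) = false := by
      cases hE : PySem.Chars.endswith cs ('.' :: w)
      · rfl
      · exact absurd ((PySem.Chars.endswith_iff cs ('.' :: w)).mp hE) hs
    rw [h1]
    exact (beq_eq_false_iff_ne.mpr hx).symm

-- Bool form when the path has no dot: no endswith test with a leading dot can fire.
theorem endswith_eq_false (cs w : List Char) (hl : afterLastDot cs = none) :
    PySem.Chars.endswith cs ('.' :: w) = false := by
  cases hE : PySem.Chars.endswith cs ('.' :: w)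
  · rfl
  · have hsuf := (PySem.Chars.endswith_iff cs ('.' :: w)).mp hE
    exact absurd (hsuf.subset (by simp)) ((afterLastDot_eq_none_iff cs).mp hl)

-- The two port bodies agree for every lowered character list.
theorem ports_agree (cs : List Char) :
    pvSuspiciousExtensions.any (fun ext => PySem.Chars.endswith cs ext)
      = (!(rpartitionDot cs).2.1.isEmpty && PySem.Set.contains pvSuffixes (rpartitionDot cs).2.2) := by
  obtain ⟨hnone, hsome⟩ := rpartitionDot_spec cs
  cases h : afterLastDot cs with
  | none =>
    rw [hnone h]
    simp only [List.isEmpty_nil, Bool.not_true, Bool.false_and]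
    rw [pvExts_eq]
    refine List.any_eq_false.mpr ?_
    intro e he
    obtain ⟨w, hw, rfl⟩ := List.mem_map.mp he
    simp [endswith_eq_false cs w h]
  | some t =>
    have h2 := hsome t h
    rw [h2]
    simp only [List.isEmpty_cons, Bool.not_false, Bool.true_and]
    have hcont : PySem.Set.contains pvSuffixes t = true ↔ t ∈ pvSuffixWords := by
      rw [pvSuffixes_eq]
      exact PySem.Set.contains_iff _ _
    rw [pvExts_eq, Bool.eq_iff_iff, List.any_eq_true]
    constructor
    · rintro ⟨e, he, hE⟩
      obtain ⟨w, hw, rfl⟩ := List.mem_map.mp he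
      rw [endswith_eq_beq cs t w h (pvSuffixWords_nodot w hw)] at hE
      exact hcont.mpr (beq_iff_eq.mp hE ▸ hw)
    · intro hB
      have ht := hcont.mp hB
      exact ⟨'.' :: t, List.mem_map.mpr ⟨t, ht, rfl⟩,
        by rw [endswith_eq_beq cs t t h (pvSuffixWords_nodot t ht)]; simp⟩

-- ===== VERDICT (by name: the statement is the Claim_ definition above) =====
theorem detect_suspicious_file_extension_py_spec : Claim_equal_detect_suspicious_file_extension_py := by
  intro path _
  unfold Spec_detect_suspicious_file_extension_py detect_suspicious_file_extension_py detect_suspicious_file_extension_py_alt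
  exact ports_agree (PySem.Chars.lower path.toList)
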